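/- GENERATED by farm/mkstatement.py from design/units.tsv (unit `codebook_decode_scalar_raw.COMPOSITION`) and the Specs of Vorbis/Spec/*.lean — do not edit.
   THE STATEMENT of the proof unit `codebook_decode_scalar_raw.COMPOSITION`: the function `codebook_decode_scalar_raw` (186 instructions) satisfies its contract,
   GIVEN THE STATEMENTS OF ITS 4 SEGMENTS (`Vorbis.Spec.ScalarRaw.Claim<k> Lay μ u₀`: what the unit `codebook_decode_scalar_raw.<k>` proves).
   No machine code is walked: `ReachVia.trans` along the segments (the exit assertion of a segment is the entry assertion of
   its successor), an induction on the loop measures. What the names mean: Vorbis/Spec/Basic.lean. The theorem to prove: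
   `theorem codebook_decode_scalar_raw_COMPOSITION_ok : Vorbis.Spec.codebook_decode_scalar_raw_COMPOSITION.Statement`. -/
import Vorbis.Spec.Codebook
import Vorbis.Spec.Codebook.ScalarRaw
namespace Vorbis.Spec.codebook_decode_scalar_raw_COMPOSITION
open X86 X86.User Asan

/-- The statement of unit `codebook_decode_scalar_raw.COMPOSITION`. -/
def Statement : Prop :=
  ∀ (Lay : Layout) (_hLay : Lay.hi = 0x1000000) (μ : Microarch) (_hμ : UserX.MicroOK μ) (u₀ : State)
    (_h_codebook_decode_scalar_raw_1 : Vorbis.Spec.ScalarRaw.Claim1 Lay μ u₀)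
    (_h_codebook_decode_scalar_raw_2 : Vorbis.Spec.ScalarRaw.Claim2 Lay μ u₀)
    (_h_codebook_decode_scalar_raw_3 : Vorbis.Spec.ScalarRaw.Claim3 Lay μ u₀)
    (_h_codebook_decode_scalar_raw_4 : Vorbis.Spec.ScalarRaw.Claim4 Lay μ u₀),
    ∀ (others : List Obj) (frames : List (Nat × FrameLayout)) (Blk : Block → Prop) (len : Nat), Calls Lay μ Vorbis.WayInv (Vorbis.conv u₀) Vorbis.L.codebook_decode_scalar_raw.entry (Vorbis.Spec.codebook_decode_scalar_raw.spec others frames Blk len)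

end Vorbis.Spec.codebook_decode_scalar_raw_COMPOSITION
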